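-- pv_equiv track=rewrite | github.com/Stanislavwx/Functional_programing_FEP-23 | lab10/lab10_etl_core.py | only_digits
-- ===== SOURCE A (Python) =====
-- from operator import methodcaller
--
-- strip = methodcaller("strip")
--
-- def only_digits(s: str) -> str:
--     s2 = strip(s)
--     if not s2:
--         return ""
--     out = []
--     for i, ch in enumerate(s2):
--         if ch.isdigit() or (i == 0 and ch in "+-"):
--             out.append(ch)
--     return "".join(out)
-- ===== SOURCE B (Python) =====
-- def only_digits(s: str) -> str:
--     # Traverse the stripped string BACKWARDS, prepending digits; position 0
--     # is handled last, where a leading sign is also accepted.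
--     s2 = s.strip()
--     out = ""
--     i = len(s2) - 1
--     while i > 0:
--         c = s2[i]
--         if c.isdigit():
--             out = c + out
--         i -= 1
--     if s2:
--         c = s2[0]
--         if c.isdigit() or c in "+-":
--             out = c + out
--     return out
-- ===== Notes on version B (the rewrite author's own statement) =====
-- stated objective: alternative
-- what changed: B traverses the stripped string backwards with an index-countdown while loop, prepending digits to the result, and handles position 0 (digit or sign) after the loop, instead of A's forward enumerate pass with an i==0 test inside the loop.
import Mathlib
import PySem

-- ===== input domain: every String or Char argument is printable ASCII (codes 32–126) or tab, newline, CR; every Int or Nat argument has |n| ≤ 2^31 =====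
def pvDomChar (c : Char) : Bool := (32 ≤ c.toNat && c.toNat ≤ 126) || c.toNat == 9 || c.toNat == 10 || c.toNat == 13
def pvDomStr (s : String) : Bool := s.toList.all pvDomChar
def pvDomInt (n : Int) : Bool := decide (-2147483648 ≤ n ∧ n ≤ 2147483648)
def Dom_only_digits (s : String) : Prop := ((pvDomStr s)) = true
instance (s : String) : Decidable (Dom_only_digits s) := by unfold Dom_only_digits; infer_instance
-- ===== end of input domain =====

-- B traverses backwards, prepending digits, and treats position 0 (digit or sign) after the loop (objective: alternative).
-- ===== PORT A =====
def only_digits (s : String) : String :=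
  let s2 := (PySem.Str.strip s).toList
  if s2.isEmpty then ""
  else
    String.mk ((PySem.List.enumerate s2 0).foldl
      (fun out p =>
        if PySem.Chars.isdigit p.2 || (p.1 == 0 && (p.2 == '+' || p.2 == '-')) then
          out ++ [p.2]
        else out) [])

-- ===== PORT B =====
-- B's `while i > 0` countdown: processes index i, then i-1, …, 1, prepending digits.
def onlyDigitsAltLoop (s2 : List Char) : Nat → List Char → List Char
  | 0, out => out
  | Nat.succ j, out =>
      let c := s2.getD (j + 1) ' '
      onlyDigitsAltLoop s2 j (if PySem.Chars.isdigit c then c :: out else out)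

def only_digits_alt (s : String) : String :=
  let s2 := (PySem.Str.strip s).toList
  let out := onlyDigitsAltLoop s2 (s2.length - 1) []
  let out2 :=
    if s2.isEmpty then out
    else
      let c := s2.getD 0 ' '
      if PySem.Chars.isdigit c || (c == '+' || c == '-') then c :: out else out
  String.mk out2

-- ===== PRECONDITION & SPEC =====
def Spec_only_digits (s : String) (out : String) : Prop := out = only_digits_alt s
instance (s : String) (out : String) : Decidable (Spec_only_digits s out) := by unfold Spec_only_digits; infer_instance

-- ===== CLAIM (what is proved, stated in full; the proofs are below) =====
def Claim_equal_only_digits : Prop := ∀ (s : String), Dom_only_digits s → Spec_only_digits s (only_digits s)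

-- ===== LEMMAS AND PROOFS =====
-- After the first element the index is never 0, so A's loop is a digit filter.
theorem only_digits_loop_filter (xs : List Char) (k : Int) (hk : 1 ≤ k) (acc : List Char) :
    (PySem.List.enumerate xs k).foldl
      (fun out p =>
        if PySem.Chars.isdigit p.2 || (p.1 == 0 && (p.2 == '+' || p.2 == '-')) then
          out ++ [p.2]
        else out) acc = acc ++ xs.filter PySem.Chars.isdigit := by
  induction xs generalizing k acc with
  | nil =>
      rw [PySem.List.enumerate_nil, List.foldl_nil, List.filter_nil, List.append_nil]
  | cons x xs ih =>
      have hk0 : (k == 0) = false := beq_eq_false_iff_ne.mpr (by omega)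
      rw [PySem.List.enumerate_cons, List.foldl_cons]
      cases hd : PySem.Chars.isdigit x with
      | false =>
          rw [if_neg (by simp [hk0]), ih (k + 1) (by omega)]
          rw [List.filter_cons, if_neg (by simp [hd])]
      | true =>
          rw [if_pos (by simp [hd]), ih (k + 1) (by omega)]
          rw [List.filter_cons, if_pos hd]
          simp

theorem plus_minus_not_digit (c : Char) (hd : PySem.Chars.isdigit c = true) :
    (c == '+' || c == '-') = false := by
  cases h2 : (c == '+' || c == '-') with
  | false => rfl
  | true =>
      have hc : c = '+' ∨ c = '-' := by simpa using h2
      rcases hc with rfl | rfl <;> exact absurd hd (by decide)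

-- B's backward loop down from i collects the digits of s2[1..i] in order.
theorem onlyDigitsAltLoop_filter (s2 : List Char) (i : Nat) (hi : i < s2.length)
    (out : List Char) :
    onlyDigitsAltLoop s2 i out
      = ((s2.take (i + 1)).drop 1).filter PySem.Chars.isdigit ++ out := by
  induction i generalizing out with
  | zero =>
      cases s2 with
      | nil => simp [onlyDigitsAltLoop]
      | cons c rest => simp [onlyDigitsAltLoop]
  | succ j ih =>
      have hj : j < s2.length := by omega
      have hget : s2.getD (j + 1) ' ' = s2[j + 1] := List.getD_eq_getElem s2 ' ' hi
      have htake : s2.take (j + 2) = s2.take (j + 1) ++ [s2[j + 1]] := by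
        rw [List.take_succ]
        simp [List.getElem?_eq_getElem hi]
      have hne : (s2.take (j + 1)) ≠ [] := by
        have : (s2.take (j + 1)).length = j + 1 := by
          rw [List.length_take]; omega
        intro h; rw [h] at this; simp at this
      obtain ⟨a, as, ha⟩ := List.exists_cons_of_ne_nil hne
      rw [onlyDigitsAltLoop, hget, ih hj, htake, ha]
      cases hd : PySem.Chars.isdigit s2[j + 1] with
      | false => simp [List.filter_append, hd]
      | true => simp [List.filter_append, hd]

-- ===== VERDICT (by name: the statement is the Claim_ definition above) =====
theorem only_digits_spec : Claim_equal_only_digits := by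
  intro s _
  unfold Spec_only_digits only_digits only_digits_alt
  cases h : (PySem.Str.strip s).toList with
  | nil => simp [onlyDigitsAltLoop]; decide
  | cons c rest =>
      simp only [List.isEmpty_cons]
      have hloop : onlyDigitsAltLoop (c :: rest) ((c :: rest).length - 1) []
          = rest.filter PySem.Chars.isdigit := by
        rcases rest with _ | ⟨d, ds⟩
        · simp [onlyDigitsAltLoop]
        · have hlen : (c :: d :: ds).length - 1 = (d :: ds).length := by simp
          rw [hlen, onlyDigitsAltLoop_filter (c :: d :: ds) (d :: ds).length (by simp) []]
          simp [List.take_of_length_le]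
      rw [if_neg (by simp), PySem.List.enumerate_cons, List.foldl_cons,
        only_digits_loop_filter rest (0 + 1) (by omega), hloop]
      by_cases hd : PySem.Chars.isdigit c
      · simp [hd, plus_minus_not_digit c hd]
      · by_cases hs : (c == '+' || c == '-') = true
        · simp [hd, hs]
        · simp [hd, hs]
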